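-- pv_equiv track=rewrite | github.com/greggjuri/ff-draft-room | backend/utils/rankings.py | _assign_tier
-- ===== SOURCE A (Python) =====
-- TIER_BREAKPOINTS: dict[str, list[tuple[int, int]]] = {
--     "QB": [(3, 1), (6, 2), (10, 3), (14, 4), (18, 5), (24, 6), (30, 7)],
--     "RB": [(4, 1), (8, 2), (12, 3), (16, 4), (24, 5), (32, 6), (42, 7), (50, 8)],
--     "WR": [(4, 1), (8, 2), (16, 3), (24, 4), (36, 5), (50, 6)],
--     "TE": [(3, 1), (6, 2), (10, 3), (14, 4), (18, 5), (24, 6), (30, 7)],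
-- }
--
-- def _assign_tier(position: str, rank: int) -> int:
--     """Map a position rank to a tier number using TIER_BREAKPOINTS."""
--     breakpoints = TIER_BREAKPOINTS.get(position, [])
--     for max_rank, tier in breakpoints:
--         if rank <= max_rank:
--             return tier
--     # Beyond last breakpoint — return last tier number
--     if breakpoints:
--         return breakpoints[-1][1]
--     return 1
-- ===== SOURCE B (Python) =====
-- TIER_BREAKPOINTS: dict[str, list[tuple[int, int]]] = {
--     "QB": [(3, 1), (6, 2), (10, 3), (14, 4), (18, 5), (24, 6), (30, 7)],
--     "RB": [(4, 1), (8, 2), (12, 3), (16, 4), (24, 5), (32, 6), (42, 7), (50, 8)],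
--     "WR": [(4, 1), (8, 2), (16, 3), (24, 4), (36, 5), (50, 6)],
--     "TE": [(3, 1), (6, 2), (10, 3), (14, 4), (18, 5), (24, 6), (30, 7)],
-- }
--
-- def _assign_tier(position: str, rank: int) -> int:
--     """Binary search: first breakpoint whose max_rank >= rank; clamp to last tier."""
--     bps = TIER_BREAKPOINTS.get(position, [])
--     if not bps:
--         return 1
--     lo, hi = 0, len(bps)
--     while lo < hi:
--         mid = (lo + hi) // 2
--         if bps[mid][0] < rank:
--             lo = mid + 1
--         else:
--             hi = mid
--     if lo == len(bps):
--         lo = len(bps) - 1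
--     return bps[lo][1]
-- ===== Notes on version B (the rewrite author's own statement) =====
-- stated objective: alternative
-- what changed: Replaced A's linear scan over the breakpoint list (with a separate beyond-last fallback) by a binary search (bisect_left-style while loop) over the sorted max_rank thresholds, clamping the index to the last entry.
import Mathlib
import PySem

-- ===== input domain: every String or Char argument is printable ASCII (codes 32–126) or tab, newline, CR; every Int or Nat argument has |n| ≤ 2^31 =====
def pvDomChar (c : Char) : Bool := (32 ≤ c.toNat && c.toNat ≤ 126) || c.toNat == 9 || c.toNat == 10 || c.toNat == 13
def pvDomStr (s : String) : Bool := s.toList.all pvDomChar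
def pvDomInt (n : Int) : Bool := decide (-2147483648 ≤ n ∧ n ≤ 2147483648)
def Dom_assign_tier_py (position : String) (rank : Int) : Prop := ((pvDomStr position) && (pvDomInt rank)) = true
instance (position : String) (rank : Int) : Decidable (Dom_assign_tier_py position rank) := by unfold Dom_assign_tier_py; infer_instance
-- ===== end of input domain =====

-- B replaces A's linear scan over the breakpoints with a binary search over them (alternative decomposition, same result).

-- Shared module-level constant TIER_BREAKPOINTS (data used by both programs).
def tierBreakpoints : PySem.Dict String (List (Int × Int)) :=
  PySem.Dict.ofList
    [ ("QB", [(3, 1), (6, 2), (10, 3), (14, 4), (18, 5), (24, 6), (30, 7)]),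
      ("RB", [(4, 1), (8, 2), (12, 3), (16, 4), (24, 5), (32, 6), (42, 7), (50, 8)]),
      ("WR", [(4, 1), (8, 2), (16, 3), (24, 4), (36, 5), (50, 6)]),
      ("TE", [(3, 1), (6, 2), (10, 3), (14, 4), (18, 5), (24, 6), (30, 7)]) ]

-- ===== PORT A =====
-- A's 'for max_rank, tier in breakpoints: if rank <= max_rank: return tier' loop (early return as Option)
def tierScan : List (Int × Int) → Int → Option Int
  | [], _ => none
  | (max_rank, tier) :: rest, rank =>
      if rank ≤ max_rank then some tier else tierScan rest rank

def assign_tier_py (position : String) (rank : Int) : Int :=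
  let breakpoints := tierBreakpoints.getD position []
  match tierScan breakpoints rank with
  | some tier => tier
  | none =>
      if breakpoints ≠ [] then (PySem.List.pyGetD breakpoints (-1) (0, 0)).2  -- breakpoints[-1][1], guarded nonempty
      else 1

-- ===== PORT B =====
-- Source B's 'while lo < hi' binary-search loop
def tierBisect (bps : List (Int × Int)) (rank : Int) (lo hi : Nat) : Nat :=
  if lo < hi then
    let mid := (lo + hi) / 2
    if (bps.getD mid (0, 0)).1 < rank then tierBisect bps rank (mid + 1) hi
    else tierBisect bps rank lo mid
  else lo
termination_by hi - lo
decreasing_by all_goals omega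

def assign_tier_py_alt (position : String) (rank : Int) : Int :=
  let bps := tierBreakpoints.getD position []
  if bps = [] then 1
  else
    let lo := tierBisect bps rank 0 bps.length
    let lo := if lo = bps.length then bps.length - 1 else lo
    (bps.getD lo (0, 0)).2

-- ===== PRECONDITION & SPEC =====
def Spec_assign_tier_py (position : String) (rank : Int) (out : Int) : Prop := out = assign_tier_py_alt position rank
instance (position : String) (rank : Int) (out : Int) : Decidable (Spec_assign_tier_py position rank out) := by unfold Spec_assign_tier_py; infer_instance

-- ===== CLAIM (what is proved, stated in full; the proofs are below) =====
def Claim_equal_assign_tier_py : Prop := ∀ (position : String) (rank : Int), Dom_assign_tier_py position rank → Spec_assign_tier_py position rank (assign_tier_py position rank)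

-- ===== LEMMAS AND PROOFS =====
-- any position's breakpoint list is one of the four table rows (QB/TE coincide) or []
lemma getD_cases (position : String) :
    tierBreakpoints.getD position [] = [(3, 1), (6, 2), (10, 3), (14, 4), (18, 5), (24, 6), (30, 7)]
    ∨ tierBreakpoints.getD position [] = [(4, 1), (8, 2), (12, 3), (16, 4), (24, 5), (32, 6), (42, 7), (50, 8)]
    ∨ tierBreakpoints.getD position [] = [(4, 1), (8, 2), (16, 3), (24, 4), (36, 5), (50, 6)]
    ∨ tierBreakpoints.getD position [] = [] := by
  have h : tierBreakpoints = PySem.Dict.mk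
    [ ("QB", [(3, 1), (6, 2), (10, 3), (14, 4), (18, 5), (24, 6), (30, 7)]),
      ("RB", [(4, 1), (8, 2), (12, 3), (16, 4), (24, 5), (32, 6), (42, 7), (50, 8)]),
      ("WR", [(4, 1), (8, 2), (16, 3), (24, 4), (36, 5), (50, 6)]),
      ("TE", [(3, 1), (6, 2), (10, 3), (14, 4), (18, 5), (24, 6), (30, 7)]) ] := by decide
  rw [h]
  simp [PySem.Dict.getD, PySem.Dict.get?_mk_cons]
  split_ifs <;> tauto

set_option maxHeartbeats 1000000 in
lemma eq_on_bps (position : String) (rank : Int) :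
    assign_tier_py position rank = assign_tier_py_alt position rank := by
  unfold assign_tier_py assign_tier_py_alt
  rcases getD_cases position with h | h | h | h <;> rw [h] <;>
    simp [tierScan, tierBisect, PySem.List.pyGetD] <;>
    split_ifs <;> simp [PySem.List.pyGet?, PySem.List.pyIdx?] <;> omega

-- ===== VERDICT (by name: the statement is the Claim_ definition above) =====
theorem assign_tier_py_spec : Claim_equal_assign_tier_py := by
  intro position rank _
  unfold Spec_assign_tier_py
  exact eq_on_bps position rank
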